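-- pv_equiv track=rewrite | github.com/statox/vim-compare-lines | python/LCS.py | diffLineWithLCS
-- ===== SOURCE A (Python) =====
-- def diffLineWithLCS(line, lcs):
--     # Will contain the part of the string whic differ from the LCS
--     diffParts = []
--
--     currentPart = ""
--     comparedChar = lcs[0]
--
--     # Creation of the diff
--     for i in line:
--         # Character commom with lcs: new separation in the differences
--         if (i == comparedChar):
--             lcs = lcs[1:]
--
--             if currentPart != "":
--                 diffParts.append(currentPart)
--                 currentPart=""
--             if len(lcs) > 0:
--                 comparedChar = lcs[0]
--             else:
--                 comparedChar = None
--
--         else: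
--             currentPart+=i
--
--     # Add the last difference
--     if currentPart != "":
--         diffParts.append(currentPart)
--
--     return diffParts
-- ===== SOURCE B (Python) =====
-- def diffLineWithLCS(line, lcs):
--     # Walk lcs, slicing out the stretch of line before each matched character.
--     parts = []
--     rest = line
--     for ch in lcs:
--         k = rest.find(ch)
--         if k == -1:
--             break
--         if k > 0:
--             parts.append(rest[:k])
--         rest = rest[k + 1:]
--     if rest:
--         parts.append(rest)
--     return parts
-- ===== Notes on version B (the rewrite author's own statement) =====
-- stated objective: alternative
-- what changed: B iterates over lcs instead of over line, using str.find to locate each next matched character and slicing out the stretch of line before it, instead of A's char-by-char scan of line with a running currentPart buffer.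
import Mathlib
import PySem

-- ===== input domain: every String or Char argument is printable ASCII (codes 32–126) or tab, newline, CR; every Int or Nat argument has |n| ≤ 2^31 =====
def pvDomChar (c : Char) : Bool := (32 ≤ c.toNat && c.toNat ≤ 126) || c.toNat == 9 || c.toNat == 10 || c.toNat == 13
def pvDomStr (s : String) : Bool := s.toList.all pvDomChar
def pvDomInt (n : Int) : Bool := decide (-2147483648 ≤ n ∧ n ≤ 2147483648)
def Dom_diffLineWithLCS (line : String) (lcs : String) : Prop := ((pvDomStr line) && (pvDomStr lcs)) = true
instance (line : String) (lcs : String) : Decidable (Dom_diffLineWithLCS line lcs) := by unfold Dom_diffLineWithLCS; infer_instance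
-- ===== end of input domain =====

-- B iterates over lcs with str.find and slicing instead of A's char-by-char scan of line; return values only, no mutation.

-- ===== PORT A =====
-- loop state: (diffParts, currentPart, remaining lcs, comparedChar)
def pvALoop : List Char → List String → List Char → List Char → Option Char → List String × List Char
  | [], dp, cp, _, _ => (dp, cp)
  | c :: cs, dp, cp, rest, cc =>
    if some c = cc then
      let rest' := PySem.Chars.slice rest (some 1) none      -- lcs = lcs[1:]
      let dp' := if cp ≠ [] then dp ++ [String.ofList cp] else dp
      let cc' := if rest'.length > 0 then rest'[0]? else none
      pvALoop cs dp' [] rest' cc'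
    else
      pvALoop cs dp (cp ++ [c]) rest cc

def diffLineWithLCS (line : String) (lcs : String) : List String :=
  match PySem.List.pyGet? lcs.toList 0 with                  -- comparedChar = lcs[0]; none = IndexError, excluded by Pre_
  | none => []
  | some c0 =>
    let (dp, cp) := pvALoop line.toList [] [] lcs.toList (some c0)
    if cp ≠ [] then dp ++ [String.ofList cp] else dp

-- ===== PORT B =====
-- loop over lcs; each step finds the next matched char in the rest of line and slices off the part before it
def pvBLoop : List Char → List Char → List String
  | [], rest => if rest ≠ [] then [String.ofList rest] else []
  | ch :: lrest, rest =>
    let k := PySem.Chars.find rest [ch]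
    if k = -1 then (if rest ≠ [] then [String.ofList rest] else [])
    else
      (if k > 0 then [String.ofList (PySem.Chars.slice rest none (some k))] else []) ++
      pvBLoop lrest (PySem.Chars.slice rest (some (k + 1)) none)

def diffLineWithLCS_alt (line : String) (lcs : String) : List String :=
  pvBLoop lcs.toList line.toList

-- ===== PRECONDITION & SPEC =====
-- Pre_ excludes only lcs = "", where A raises IndexError on lcs[0]
def Pre_diffLineWithLCS (line : String) (lcs : String) : Prop := lcs ≠ ""
instance (line : String) (lcs : String) : Decidable (Pre_diffLineWithLCS line lcs) := by unfold Pre_diffLineWithLCS; infer_instance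
def pvWitness_diffLineWithLCS : String × String := ("xaybzc", "abc")

def Spec_diffLineWithLCS (line : String) (lcs : String) (out : List String) : Prop := out = diffLineWithLCS_alt line lcs
instance (line : String) (lcs : String) (out : List String) : Decidable (Spec_diffLineWithLCS line lcs out) := by unfold Spec_diffLineWithLCS; infer_instance

-- ===== CLAIM (what is proved, stated in full; the proofs are below) =====
def Claim_equal_diffLineWithLCS : Prop := ∀ (line : String) (lcs : String), Dom_diffLineWithLCS line lcs → Pre_diffLineWithLCS line lcs → Spec_diffLineWithLCS line lcs (diffLineWithLCS line lcs)

-- ===== LEMMAS AND PROOFS =====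

-- str.find with a single-character needle: the characterising facts
theorem pv_find_eq_of (l : List Char) (ch : Char) (k : Nat)
    (h1 : [ch] <+: l.drop k) (h2 : ∀ i < k, ¬ [ch] <+: l.drop i) :
    PySem.Chars.find l [ch] = (k : Int) := by
  have hin : [ch] <:+: l := by
    rw [← PySem.Chars.isIn_iff_infix, ← PySem.Chars.exists_prefix_drop_iff_isIn]
    exact ⟨k, h1⟩
  have hnn : 0 ≤ PySem.Chars.find l [ch] := (PySem.Chars.find_nonneg_iff l [ch]).2 hin
  obtain ⟨hpre, hmin⟩ := PySem.Chars.find_spec hnn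
  rcases lt_trichotomy (PySem.Chars.find l [ch]).toNat k with h | h | h
  · exact absurd hpre (h2 _ h)
  · omega
  · exact absurd h1 (hmin _ h)

theorem pv_find_nil (ch : Char) : PySem.Chars.find [] [ch] = -1 := by
  rw [PySem.Chars.find_eq_neg_one_iff]; simp

theorem pv_find_cons_self (ch : Char) (cs : List Char) :
    PySem.Chars.find (ch :: cs) [ch] = 0 := by
  simpa using pv_find_eq_of (ch :: cs) ch 0 (by simp) (by omega)

theorem pv_find_cons_of_ne (c ch : Char) (cs : List Char) (hne : c ≠ ch) :
    PySem.Chars.find (c :: cs) [ch] =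
      if PySem.Chars.find cs [ch] = -1 then -1 else PySem.Chars.find cs [ch] + 1 := by
  by_cases h : PySem.Chars.find cs [ch] = -1
  · rw [if_pos h, PySem.Chars.find_eq_neg_one_iff]
    rw [PySem.Chars.find_eq_neg_one_iff] at h
    simp [List.singleton_infix_iff] at h ⊢
    exact ⟨fun e => hne e.symm, h⟩
  · rw [if_neg h]
    have hnn : 0 ≤ PySem.Chars.find cs [ch] := by
      have := PySem.Chars.neg_one_le_find cs [ch]; omega
    obtain ⟨hpre, hmin⟩ := PySem.Chars.find_spec hnn
    have := pv_find_eq_of (c :: cs) ch ((PySem.Chars.find cs [ch]).toNat + 1)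
      (by simpa using hpre)
      (by
        intro i hi
        cases i with
        | zero => simp; exact fun e => hne e.symm
        | succ j => simpa using hmin j (by omega))
    rw [this]; omega

-- proof-side reference form of B: pvBLoop with the bounds reduced to take/drop and a pending current-part prefix cp
def pvSeg : List Char → List Char → List Char → List String
  | cp, line, [] => if cp ++ line ≠ [] then [String.ofList (cp ++ line)] else []
  | cp, line, ch :: lrest =>
    let k := PySem.Chars.find line [ch]
    if k = -1 then (if cp ++ line ≠ [] then [String.ofList (cp ++ line)] else [])
    else
      (if cp ++ line.take k.toNat ≠ [] then [String.ofList (cp ++ line.take k.toNat)] else []) ++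
      pvSeg [] (line.drop (k.toNat + 1)) lrest

theorem pvBLoop_eq_pvSeg (lcs : List Char) (line : List Char) :
    pvBLoop lcs line = pvSeg [] line lcs := by
  induction lcs generalizing line with
  | nil => simp [pvBLoop, pvSeg]
  | cons ch lrest ih =>
    simp only [pvBLoop, pvSeg, List.nil_append]
    by_cases h : PySem.Chars.find line [ch] = -1
    · simp [h]
    · have hnn : 0 ≤ PySem.Chars.find line [ch] := by
        have := PySem.Chars.neg_one_le_find line [ch]; omega
      have hinf : [ch] <:+: line := (PySem.Chars.find_nonneg_iff line [ch]).1 hnn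
      have hne : line ≠ [] := by rintro rfl; simp at hinf
      rw [if_neg h, if_neg h]
      have h1 : PySem.Chars.slice line none (some (PySem.Chars.find line [ch])) =
          line.take (PySem.Chars.find line [ch]).toNat := by
        simp [PySem.Chars.slice_eq_listSlice, PySem.List.slice_to _ hnn]
      have h2 : PySem.Chars.slice line (some (PySem.Chars.find line [ch] + 1)) none =
          line.drop ((PySem.Chars.find line [ch]).toNat + 1) := by
        rw [PySem.Chars.slice_eq_listSlice, PySem.List.slice_from _ (by omega : (0:Int) ≤ _)]
        congr 1
        omega
      rw [h1, h2, ih]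
      congr 1
      by_cases hk : PySem.Chars.find line [ch] > 0
      · rw [if_pos hk, if_pos]
        simp [hne]
        omega
      · rw [if_neg hk, if_neg]
        simp
        omega

-- A's loop with the accumulated diffParts factored out
theorem pvALoop_append (line : List Char) (d dp : List String) (cp rest : List Char) (cc : Option Char) :
    pvALoop line (d ++ dp) cp rest cc =
      (d ++ (pvALoop line dp cp rest cc).1, (pvALoop line dp cp rest cc).2) := by
  induction line generalizing dp cp rest cc with
  | nil => simp [pvALoop]
  | cons c cs ih =>
    simp only [pvALoop]
    by_cases h : some c = cc
    · rw [if_pos h, if_pos h]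
      by_cases hcp : cp ≠ []
      · simp only [if_pos hcp, List.append_assoc]; exact ih _ _ _ _
      · simp only [if_neg hcp]; exact ih _ _ _ _
    · rw [if_neg h, if_neg h]; exact ih _ _ _ _

def pvFinish (r : List String × List Char) : List String :=
  if r.2 ≠ [] then r.1 ++ [String.ofList r.2] else r.1

theorem pv_head_aux (l : List Char) :
    (if l.length > 0 then l[0]? else none) = l.head? := by
  cases l <;> simp

-- pvSeg absorbs one unmatched character of line into the pending part
theorem pvSeg_shift (c ch : Char) (cp cs lrest : List Char) (hne : c ≠ ch) :
    pvSeg cp (c :: cs) (ch :: lrest) = pvSeg (cp ++ [c]) cs (ch :: lrest) := by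
  simp only [pvSeg, pv_find_cons_of_ne c ch cs hne]
  by_cases h : PySem.Chars.find cs [ch] = -1
  · simp [h]
  · have hnn : 0 ≤ PySem.Chars.find cs [ch] := by
      have := PySem.Chars.neg_one_le_find cs [ch]; omega
    rw [if_neg h]
    have hk1 : ¬ (PySem.Chars.find cs [ch] + 1 = -1) := by omega
    rw [if_neg hk1, if_neg h]
    have ht : (PySem.Chars.find cs [ch] + 1).toNat = (PySem.Chars.find cs [ch]).toNat + 1 := by omega
    rw [ht]
    simp [List.take_succ_cons, List.drop_succ_cons]

-- main invariant: A's scan from state (diffParts = [], currentPart = cp, lcs = rest) finishes to pvSeg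
theorem pvALoop_eq_pvSeg (line : List Char) (lcs cp : List Char) :
    pvFinish (pvALoop line [] cp lcs lcs.head?) = pvSeg cp line lcs := by
  induction line generalizing lcs cp with
  | nil =>
    cases lcs with
    | nil => simp [pvALoop, pvFinish, pvSeg]
    | cons ch lrest => simp [pvALoop, pvFinish, pvSeg, pv_find_nil]
  | cons c cs ih =>
    cases lcs with
    | nil =>
      simp only [pvALoop, List.head?_nil, reduceCtorEq, reduceIte]
      rw [show (none : Option Char) = ([] : List Char).head? from rfl, ih [] (cp ++ [c])]
      simp [pvSeg]
    | cons ch lrest =>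
      simp only [pvALoop, List.head?_cons]
      by_cases hc : c = ch
      · subst hc
        rw [if_pos rfl]
        have hslice : PySem.Chars.slice (c :: lrest) (some 1) none = lrest := by
          simp [PySem.Chars.slice_eq_listSlice, PySem.List.slice_from_one]
        simp only [hslice, pv_head_aux]
        have := pvALoop_append cs (if cp ≠ [] then [String.ofList cp] else []) [] [] lrest lrest.head?
        simp only [List.append_nil] at this
        rw [show (if cp ≠ [] then [] ++ [String.ofList cp] else ([] : List String)) =
              (if cp ≠ [] then [String.ofList cp] else []) by simp, this]
        have hfin : pvFinish ((if cp ≠ [] then [String.ofList cp] else []) ++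
            (pvALoop cs [] [] lrest lrest.head?).1, (pvALoop cs [] [] lrest lrest.head?).2) =
            (if cp ≠ [] then [String.ofList cp] else []) ++
              pvFinish (pvALoop cs [] [] lrest lrest.head?) := by
          unfold pvFinish
          by_cases h : (pvALoop cs [] [] lrest lrest.head?).2 ≠ [] <;> simp [h]
        rw [hfin, ih lrest []]
        simp only [pvSeg, pv_find_cons_self]
        norm_num
      · rw [if_neg (by simpa using fun e => hc e)]
        rw [show (some ch) = (ch :: lrest).head? by simp, ih (ch :: lrest) (cp ++ [c]),
          pvSeg_shift c ch cp cs lrest hc]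

-- ===== VERDICT (by name: the statement is the Claim_ definition above) =====
theorem diffLineWithLCS_spec : Claim_equal_diffLineWithLCS := by
  unfold Claim_equal_diffLineWithLCS
  intro line lcs _ hpre
  unfold Spec_diffLineWithLCS diffLineWithLCS diffLineWithLCS_alt
  have hl : lcs.toList ≠ [] := by
    intro h; exact hpre (String.toList_eq_nil_iff.mp h)
  obtain ⟨c0, rest, hrest⟩ : ∃ c0 rest, lcs.toList = c0 :: rest := by
    cases h : lcs.toList with
    | nil => exact absurd h hl
    | cons a b => exact ⟨a, b, rfl⟩
  have hget : PySem.List.pyGet? (c0 :: rest) 0 = some c0 := by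
    simp [PySem.List.pyGet?, PySem.List.pyIdx?]
  have hmain := pvALoop_eq_pvSeg line.toList (c0 :: rest) []
  simp only [List.head?_cons] at hmain
  rw [hrest, hget, pvBLoop_eq_pvSeg, ← hmain]
  rfl
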